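-- pv_equiv track=rewrite | github.com/loremipsumdsa/PIDO | PIDO.py | moreConnectedObligation
-- ===== SOURCE A (Python) =====
-- def moreConnectedObligation(graph, obligationSet):
--     b = 0
--     neighbourI=set()
--     neighbourB=set()
--
--     for i in range (len(obligationSet)):
--         neighbourI=set()
--
--         for vertex in obligationSet[i]:
--
--             for neighbourVertex in graph[vertex]:
--                 neighbourI.add(neighbourVertex)
--
--             if len(neighbourI)>len(neighbourB):
--                 b=i
--                 neighbourB=neighbourI.copy()
--
--     return obligationSet[b]
-- ===== SOURCE B (Python) =====
-- def moreConnectedObligation(graph, obligationSet):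
--     # sort-and-scan: union sizes via sorting, no hash set at all
--     best, bestSize = 0, -1
--     for i, vertices in enumerate(obligationSet):
--         neigh = []
--         for v in vertices:
--             neigh.extend(graph[v])
--         neigh.sort()
--         size, prev = 0, None
--         for x in neigh:
--             if x != prev:
--                 size += 1
--             prev = x
--         if size > bestSize:
--             best, bestSize = i, size
--     return obligationSet[best]
-- ===== Notes on version B (the rewrite author's own statement) =====
-- stated objective: alternative
-- what changed: A grows a hash set per obligation set and re-compares/copies the running-best set after every single vertex; B uses no sets at all: it concatenates the adjacency lists, sorts the concatenation, counts boundaries between distinct adjacent values to get the union size, and keeps the earliest strict maximum with a -1 sentinel.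
import Mathlib
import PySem

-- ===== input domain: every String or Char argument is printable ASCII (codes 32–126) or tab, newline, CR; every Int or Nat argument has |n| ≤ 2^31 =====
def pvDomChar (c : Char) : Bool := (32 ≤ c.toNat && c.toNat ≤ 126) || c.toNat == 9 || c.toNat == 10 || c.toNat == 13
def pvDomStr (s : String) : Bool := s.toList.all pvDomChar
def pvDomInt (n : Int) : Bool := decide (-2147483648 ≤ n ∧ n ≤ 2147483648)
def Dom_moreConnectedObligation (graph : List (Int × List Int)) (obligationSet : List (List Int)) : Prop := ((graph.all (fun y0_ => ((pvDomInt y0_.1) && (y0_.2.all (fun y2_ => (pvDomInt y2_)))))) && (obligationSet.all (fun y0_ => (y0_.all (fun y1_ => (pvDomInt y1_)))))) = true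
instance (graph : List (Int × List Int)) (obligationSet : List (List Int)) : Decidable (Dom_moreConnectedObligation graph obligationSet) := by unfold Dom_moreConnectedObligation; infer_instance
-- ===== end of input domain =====

-- B replaces A's per-vertex hash-set compare-and-copy by sort-based distinct counting plus a sentinel argmax ('alternative'); same return value, no speed claim.

-- ===== PORT A =====
-- literal transliteration of A: outer loop over range(len(obligationSet)), state ((b, neighbourB), neighbourI);
-- neighbourI is reset per i; the comparison/copy happens after every vertex, inside the vertex loop.
def moreConnectedObligation (graph : List (Int × List Int)) (obligationSet : List (List Int)) : List Int :=
  let st :=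
    (PySem.List.pyRange 0 (obligationSet.length : Int) 1).foldl
      (fun (st : (Int × PySem.Set Int) × PySem.Set Int) i =>
        (PySem.List.pyGetD obligationSet i []).foldl
          (fun (st : (Int × PySem.Set Int) × PySem.Set Int) vertex =>
            let nI := ((graph.lookup vertex).getD []).foldl
              (fun s x => PySem.Set.add s x) st.2
            if nI.length > st.1.2.length then ((i, nI), nI) else (st.1, nI))
          (st.1, (PySem.Set.empty : PySem.Set Int)))
      ((0, (PySem.Set.empty : PySem.Set Int)), (PySem.Set.empty : PySem.Set Int))
  PySem.List.pyGetD obligationSet st.1.1 []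

-- ===== PORT B =====
-- transliteration of Source B: for each (i, vertices) in enumerate, extend neigh, sort it,
-- count boundaries between distinct adjacent values (prev : Option Int = None), sentinel argmax.
def moreConnectedObligation_alt (graph : List (Int × List Int)) (obligationSet : List (List Int)) : List Int :=
  let st :=
    (PySem.List.enumerate obligationSet 0).foldl
      (fun (st : Int × Int) p =>
        let neigh : List Int := p.2.foldl (fun acc v => acc ++ ((graph.lookup v).getD [])) []
        let neigh := PySem.List.sorted neigh (fun x => x) false
        let cs := neigh.foldl
          (fun (c : Int × Option Int) x => (if some x ≠ c.2 then c.1 + 1 else c.1, some x))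
          ((0 : Int), (none : Option Int))
        if cs.1 > st.2 then (p.1, cs.1) else st)
      ((0 : Int), (-1 : Int))
  PySem.List.pyGetD obligationSet st.1 []

-- ===== PRECONDITION & SPEC =====
-- Pre_ excludes exactly the inputs where Python A raises: empty obligationSet (IndexError on
-- obligationSet[b]) and obligation vertices missing from the graph dict (KeyError on graph[vertex]).
-- B raises identically there.
def Pre_moreConnectedObligation (graph : List (Int × List Int)) (obligationSet : List (List Int)) : Prop :=
  obligationSet ≠ [] ∧ ∀ obl ∈ obligationSet, ∀ v ∈ obl, (graph.lookup v).isSome = true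
instance (graph : List (Int × List Int)) (obligationSet : List (List Int)) : Decidable (Pre_moreConnectedObligation graph obligationSet) := by unfold Pre_moreConnectedObligation; infer_instance

def pvWitness_moreConnectedObligation : (List (Int × List Int)) × List (List Int) :=
  ([(1, [2, 3]), (2, [3])], [[1], [2, 1]])

def Spec_moreConnectedObligation (graph : List (Int × List Int)) (obligationSet : List (List Int)) (out : List Int) : Prop := out = moreConnectedObligation_alt graph obligationSet
instance (graph : List (Int × List Int)) (obligationSet : List (List Int)) (out : List Int) : Decidable (Spec_moreConnectedObligation graph obligationSet out) := by unfold Spec_moreConnectedObligation; infer_instance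

-- ===== CLAIM (what is proved, stated in full; the proofs are below) =====
def Claim_equal_moreConnectedObligation : Prop := ∀ (graph : List (Int × List Int)) (obligationSet : List (List Int)), Dom_moreConnectedObligation graph obligationSet → Pre_moreConnectedObligation graph obligationSet → Spec_moreConnectedObligation graph obligationSet (moreConnectedObligation graph obligationSet)

-- ===== LEMMAS AND PROOFS =====

-- size of the neighbour union of one obligation set (A's set length; the common size measure)
def pvULen (graph : List (Int × List Int)) (obl : List Int) : Nat :=
  (obl.foldl (fun u v => PySem.Set.update u ((graph.lookup v).getD []))
    (PySem.Set.empty : PySem.Set Int)).length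

lemma set_add_len_mono (s : PySem.Set Int) (x : Int) :
    s.length ≤ (PySem.Set.add s x).length := by
  simp [PySem.Set.add]; split <;> simp

lemma set_update_len_mono (xs : List Int) :
    ∀ s : PySem.Set Int, s.length ≤ (xs.foldl (fun t x => PySem.Set.add t x) s).length := by
  induction xs with
  | nil => intro s; simp
  | cons x xs ih =>
    intro s
    exact le_trans (set_add_len_mono s x) (ih (PySem.Set.add s x))

-- A's inner vertex loop: the trailing component accumulates the union, neighbourB's length
-- tracks max(B0, |union|), and b flips to i exactly when |union| exceeds B0.
lemma innerA (graph : List (Int × List Int)) (i b0 : Int) (B0 : Nat) :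
    ∀ (obl : List Int) (b : Int) (B I : PySem.Set Int),
    B.length = max B0 I.length →
    b = (if B0 < I.length then i else b0) →
    (let r := obl.foldl
        (fun (st : (Int × PySem.Set Int) × PySem.Set Int) vertex =>
          let nI := ((graph.lookup vertex).getD []).foldl
            (fun s x => PySem.Set.add s x) st.2
          if nI.length > st.1.2.length then ((i, nI), nI) else (st.1, nI)) ((b, B), I)
     r.2 = obl.foldl (fun u v => PySem.Set.update u ((graph.lookup v).getD [])) I ∧
     r.1.2.length = max B0 r.2.length ∧
     r.1.1 = (if B0 < r.2.length then i else b0)) := by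
  intro obl
  induction obl with
  | nil =>
    intro b B I hB hb
    exact ⟨rfl, hB, hb⟩
  | cons v obl ih =>
    intro b B I hB hb
    simp only [List.foldl_cons]
    have hmono := set_update_len_mono ((graph.lookup v).getD []) I
    set nI := ((graph.lookup v).getD []).foldl (fun s x => PySem.Set.add s x) I with hnI
    by_cases hcmp : nI.length > B.length
    · simp only [hcmp, if_pos]
      have h1 : nI.length = max B0 nI.length := by omega
      have h2 : (i : Int) = (if B0 < nI.length then i else b0) := by
        rw [if_pos]; omega
      exact ih i nI nI h1 h2
    · simp only [hcmp, if_neg, not_false_iff]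
      have h1 : B.length = max B0 nI.length := by
        rcases Nat.lt_or_ge B0 I.length with h | h <;> omega
      have h2 : b = (if B0 < nI.length then i else b0) := by
        by_cases hc : B0 < nI.length
        · rw [if_pos hc, hb, if_pos (by omega)]
        · rw [if_neg hc, hb, if_neg (by omega)]
      exact ih b B nI h1 h2

-- main correspondence for A: over any list of in-range indices, A's fused fold computes the same
-- best index as an argmax fold over the table of union sizes.
lemma mainFold (graph : List (Int × List Int)) (obligationSet : List (List Int)) :
    ∀ (l : List Int), (∀ x ∈ l, 0 ≤ x ∧ x < (obligationSet.length : Int)) →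
    ∀ (b : Int) (B I : PySem.Set Int), 0 ≤ b → b < (obligationSet.length : Int) →
    (B.length : Int) = PySem.List.pyGetD (obligationSet.map (fun obl => (pvULen graph obl : Int))) b 0 →
    (l.foldl
      (fun (st : (Int × PySem.Set Int) × PySem.Set Int) i =>
        (PySem.List.pyGetD obligationSet i []).foldl
          (fun (st : (Int × PySem.Set Int) × PySem.Set Int) vertex =>
            let nI := ((graph.lookup vertex).getD []).foldl
              (fun s x => PySem.Set.add s x) st.2
            if nI.length > st.1.2.length then ((i, nI), nI) else (st.1, nI))
          (st.1, (PySem.Set.empty : PySem.Set Int))) ((b, B), I)).1.1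
    = l.foldl
        (fun best i =>
          if PySem.List.pyGetD (obligationSet.map (fun obl => (pvULen graph obl : Int))) i 0 >
             PySem.List.pyGetD (obligationSet.map (fun obl => (pvULen graph obl : Int))) best 0
          then i else best) b := by
  intro l
  induction l with
  | nil => intro _ b B I _ _ _; rfl
  | cons i l ih =>
    intro hmem b B I hb0 hbn hBlen
    obtain ⟨hi0, hin⟩ := hmem i (List.mem_cons_self ..)
    have hmem' : ∀ x ∈ l, 0 ≤ x ∧ x < (obligationSet.length : Int) :=
      fun x hx => hmem x (List.mem_cons_of_mem _ hx)
    simp only [List.foldl_cons]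
    obtain ⟨hr2, hrB, hrb⟩ := innerA graph i b B.length
      (PySem.List.pyGetD obligationSet i []) b B PySem.Set.empty
      (by simp [PySem.Set.empty]) (by simp [PySem.Set.empty])
    set r := (PySem.List.pyGetD obligationSet i []).foldl
        (fun (st : (Int × PySem.Set Int) × PySem.Set Int) vertex =>
          let nI := ((graph.lookup vertex).getD []).foldl
            (fun s x => PySem.Set.add s x) st.2
          if nI.length > st.1.2.length then ((i, nI), nI) else (st.1, nI))
        ((b, B), (PySem.Set.empty : PySem.Set Int)) with hrdef
    have hinlen : i < ((obligationSet.map (fun obl => (pvULen graph obl : Int))).length : Int) := by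
      simpa using hin
    have hsizei : PySem.List.pyGetD (obligationSet.map (fun obl => (pvULen graph obl : Int))) i 0
        = (pvULen graph (obligationSet[i.toNat]'(by omega)) : Int) := by
      rw [PySem.List.pyGetD_eq_getElem _ 0 hi0 hinlen]
      simp
    have hr2len : r.2.length = pvULen graph (obligationSet[i.toNat]'(by omega)) := by
      rw [hr2, PySem.List.pyGetD_eq_getElem obligationSet [] hi0 hin]
      rfl
    by_cases hc : B.length < r.2.length
    · have hcondB : PySem.List.pyGetD (obligationSet.map (fun obl => (pvULen graph obl : Int))) i 0 >
          PySem.List.pyGetD (obligationSet.map (fun obl => (pvULen graph obl : Int))) b 0 := by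
        rw [hsizei, ← hBlen, ← hr2len]; exact_mod_cast hc
      rw [if_pos hcondB]
      have hrb1 : r.1.1 = i := by rw [hrb, if_pos hc]
      have hre : r = ((i, r.1.2), r.2) := by conv_rhs => rw [← hrb1]
      rw [hre]
      refine ih hmem' i r.1.2 r.2 hi0 hin ?_
      rw [hsizei]
      have : r.1.2.length = pvULen graph (obligationSet[i.toNat]'(by omega)) := by omega
      exact_mod_cast congrArg (Nat.cast (R := Int)) this
    · have hcondB : ¬ (PySem.List.pyGetD (obligationSet.map (fun obl => (pvULen graph obl : Int))) i 0 >
          PySem.List.pyGetD (obligationSet.map (fun obl => (pvULen graph obl : Int))) b 0) := by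
        rw [hsizei, ← hBlen, ← hr2len]; exact_mod_cast hc
      rw [if_neg hcondB]
      have hrb1 : r.1.1 = b := by rw [hrb, if_neg hc]
      have hre : r = ((b, r.1.2), r.2) := by conv_rhs => rw [← hrb1]
      rw [hre]
      refine ih hmem' b r.1.2 r.2 hb0 hbn ?_
      rw [← hBlen]
      have : r.1.2.length = B.length := by omega
      exact_mod_cast congrArg (Nat.cast (R := Int)) this

-- B's distinct-count scan on a sorted tail, previous element p already seen:
-- it counts the distinct values other than p.
lemma cnt_sorted :
    ∀ (l : List Int) (c p : Int), l.Pairwise (· ≤ ·) → (∀ x ∈ l, p ≤ x) →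
    (l.foldl
      (fun (cst : Int × Option Int) x => (if some x ≠ cst.2 then cst.1 + 1 else cst.1, some x))
      (c, some p)).1 = c + ((l.toFinset.erase p).card : Int) := by
  intro l
  induction l with
  | nil => intro c p _ _; simp
  | cons x t ih =>
    intro c p hpw hge
    have hx : p ≤ x := hge x (List.mem_cons_self ..)
    obtain ⟨hxt, hpt⟩ := List.pairwise_cons.mp hpw
    simp only [List.foldl_cons]
    by_cases hxp : x = p
    · subst hxp
      simp only [ne_eq, not_true_eq_false, if_false]
      rw [ih c x hpt hxt]
      have hset : ((x :: t).toFinset.erase x) = t.toFinset.erase x := by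
        ext a
        simp only [List.toFinset_cons, Finset.mem_erase, Finset.mem_insert, List.mem_toFinset]
        tauto
      rw [hset]
    · have hcond : some x ≠ some p := by simpa using hxp
      simp only [hcond, if_pos, ne_eq, not_false_iff]
      rw [ih (c + 1) x hpt hxt]
      have hpx : p < x := lt_of_le_of_ne hx (Ne.symm hxp)
      have hpnot : p ∉ (x :: t).toFinset := by
        simp only [List.toFinset_cons, Finset.mem_insert, List.mem_toFinset]
        rintro (h | hmem)
        · omega
        · have := hxt _ hmem; omega
      rw [Finset.erase_eq_self.mpr hpnot]
      have hins : insert x t.toFinset = insert x (t.toFinset.erase x) := by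
        ext a
        simp only [Finset.mem_insert, Finset.mem_erase]
        constructor
        · rintro (h | h)
          · exact Or.inl h
          · by_cases hax : a = x
            · exact Or.inl hax
            · exact Or.inr ⟨hax, h⟩
        · rintro (h | ⟨_, h⟩)
          · exact Or.inl h
          · exact Or.inr h
      have : (x :: t).toFinset.card = (t.toFinset.erase x).card + 1 := by
        simp only [List.toFinset_cons]
        rw [hins, Finset.card_insert_of_notMem (Finset.notMem_erase x _)]
      rw [this]
      push_cast
      ring

-- B's distinct-count scan over a whole sorted list counts the distinct values.
lemma cnt_all (l : List Int) (hpw : l.Pairwise (· ≤ ·)) :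
    (l.foldl
      (fun (cst : Int × Option Int) x => (if some x ≠ cst.2 then cst.1 + 1 else cst.1, some x))
      ((0 : Int), (none : Option Int))).1 = (l.toFinset.card : Int) := by
  cases l with
  | nil => simp
  | cons x t =>
    obtain ⟨hxt, hpt⟩ := List.pairwise_cons.mp hpw
    simp only [List.foldl_cons, ne_eq, reduceCtorEq, not_false_iff, if_pos]
    have h01 : (0 : Int) + 1 = 1 := rfl
    rw [h01, cnt_sorted t 1 x hpt hxt]
    have hins : insert x t.toFinset = insert x (t.toFinset.erase x) := by
      ext a
      simp only [Finset.mem_insert, Finset.mem_erase]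
      constructor
      · rintro (h | h)
        · exact Or.inl h
        · by_cases hax : a = x
          · exact Or.inl hax
          · exact Or.inr ⟨hax, h⟩
      · rintro (h | ⟨_, h⟩)
        · exact Or.inl h
        · exact Or.inr h
    have : (x :: t).toFinset.card = (t.toFinset.erase x).card + 1 := by
      simp only [List.toFinset_cons]
      rw [hins, Finset.card_insert_of_notMem (Finset.notMem_erase x _)]
    rw [this]
    push_cast
    ring

-- A's union set (fold of Set.update over the obligation set) is Set.add folded over the
-- concatenation of the adjacency lists.
lemma updateFold_eq (adj : Int → List Int) :
    ∀ (obl : List Int) (e : PySem.Set Int),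
    obl.foldl (fun u v => PySem.Set.update u (adj v)) e
      = (obl.flatMap adj).foldl (fun s x => PySem.Set.add s x) e := by
  intro obl
  induction obl with
  | nil => intro e; rfl
  | cons v t ih =>
    intro e
    simp only [List.foldl_cons, List.flatMap_cons, List.foldl_append]
    exact ih _

-- a set built from xs has as many elements as xs has distinct values
lemma ofList_length_eq_card (xs : List Int) :
    (PySem.Set.ofList xs).length = xs.toFinset.card := by
  have hfs : (PySem.Set.ofList xs).toFinset = xs.toFinset := by
    ext a
    simp [PySem.Set.mem_ofList]
  rw [← hfs, List.toFinset_card_of_nodup (PySem.Set.nodup_ofList xs)]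

-- B's per-obligation-set size computation, named for the proofs (defeq to the port's let-chain)
def pvSizeB (graph : List (Int × List Int)) (vertices : List Int) : Int :=
  ((PySem.List.sorted
      (vertices.foldl (fun acc v => acc ++ ((graph.lookup v).getD [])) ([] : List Int))
      (fun x => x) false).foldl
    (fun (cst : Int × Option Int) x => (if some x ≠ cst.2 then cst.1 + 1 else cst.1, some x))
    ((0 : Int), (none : Option Int))).1

-- B's per-obligation-set size (extend, sort, boundary count) equals A's union-set size.
lemma sizeB_eq (graph : List (Int × List Int)) (obl : List Int) :
    pvSizeB graph obl = (pvULen graph obl : Int) := by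
  unfold pvSizeB
  rw [PySem.List.foldl_append_eq_flatMap]
  simp only [List.nil_append]
  set xs := obl.flatMap (fun v => (graph.lookup v).getD []) with hxs
  have hpw : (PySem.List.sorted xs (fun x => x) false).Pairwise (· ≤ ·) := by
    have := PySem.List.sorted_pairwise xs (fun x => x)
    simpa using this
  rw [cnt_all _ hpw]
  have hperm : (PySem.List.sorted xs (fun x => x) false).Perm xs := PySem.List.sorted_perm ..
  rw [List.toFinset_eq_of_perm _ _ hperm]
  unfold pvULen
  rw [updateFold_eq]
  have hof : ((obl.flatMap (fun v => (List.lookup v graph).getD [])).foldl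
      (fun s x => PySem.Set.add s x) (PySem.Set.empty : PySem.Set Int))
      = PySem.Set.ofList (obl.flatMap (fun v => (List.lookup v graph).getD [])) := rfl
  rw [hof, ofList_length_eq_card, ← hxs]

-- B's sentinel argmax fold: once bestSize = table[best], it is the argmax fold over the table.
lemma altFold (graph : List (Int × List Int)) (T : List Int) :
    ∀ (l : List (Int × List Int)),
    (∀ p ∈ l, pvSizeB graph p.2 = PySem.List.pyGetD T p.1 0) →
    ∀ (b sb : Int), sb = PySem.List.pyGetD T b 0 →
    (l.foldl
        (fun (st : Int × Int) p =>
          if pvSizeB graph p.2 > st.2 then (p.1, pvSizeB graph p.2) else st) (b, sb)).1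
      = l.foldl
          (fun best p =>
            if PySem.List.pyGetD T p.1 0 > PySem.List.pyGetD T best 0 then p.1 else best) b := by
  intro l
  induction l with
  | nil => intro _ b sb _; rfl
  | cons p l ih =>
    intro hmem b sb hsb
    have hp := hmem p (List.mem_cons_self ..)
    have hmem' : ∀ q ∈ l, pvSizeB graph q.2 = PySem.List.pyGetD T q.1 0 :=
      fun q hq => hmem q (List.mem_cons_of_mem _ hq)
    simp only [List.foldl_cons, hp, hsb]
    by_cases hc : PySem.List.pyGetD T p.1 0 > PySem.List.pyGetD T b 0
    · rw [if_pos hc, if_pos hc]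
      exact ih hmem' p.1 _ rfl
    · rw [if_neg hc, if_neg hc]
      exact ih hmem' b _ rfl

-- the two sides of the equivalence, as standalone lemmas on a nonempty obligation list
lemma sideA (graph : List (Int × List Int)) (o0 : List Int) (rest : List (List Int)) :
    moreConnectedObligation graph (o0 :: rest)
      = PySem.List.pyGetD (o0 :: rest)
          ((PySem.List.pyRange 1 ((o0 :: rest).length : Int) 1).foldl
            (fun best i =>
              if PySem.List.pyGetD ((o0 :: rest).map (fun obl => (pvULen graph obl : Int))) i 0 >
                 PySem.List.pyGetD ((o0 :: rest).map (fun obl => (pvULen graph obl : Int))) best 0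
              then i else best) 0) [] := by
  set obligationSet := o0 :: rest with hOS
  have hn : 0 < obligationSet.length := by simp [hOS]
  unfold moreConnectedObligation
  rw [PySem.List.pyRange_one_cons (a := 0) (by exact_mod_cast hn)]
  simp only [List.foldl_cons]
  obtain ⟨hr2, hrB, hrb⟩ := innerA graph 0 0 0
    (PySem.List.pyGetD obligationSet 0 []) 0 PySem.Set.empty PySem.Set.empty
    (by simp [PySem.Set.empty]) (by simp [PySem.Set.empty])
  set r := (PySem.List.pyGetD obligationSet 0 []).foldl
      (fun (st : (Int × PySem.Set Int) × PySem.Set Int) vertex =>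
        let nI := ((graph.lookup vertex).getD []).foldl
          (fun s x => PySem.Set.add s x) st.2
        if nI.length > st.1.2.length then ((0, nI), nI) else (st.1, nI))
      ((0, (PySem.Set.empty : PySem.Set Int)), (PySem.Set.empty : PySem.Set Int)) with hrdef
  have hrb0 : r.1.1 = 0 := by rw [hrb, ite_self]
  have hsize0 : PySem.List.pyGetD (obligationSet.map (fun obl => (pvULen graph obl : Int))) 0 0
      = (pvULen graph (obligationSet[0]'hn) : Int) := by
    rw [PySem.List.pyGetD_eq_getElem _ 0 le_rfl (by simpa using hn)]
    simp
  have hinv : (r.1.2.length : Int)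
      = PySem.List.pyGetD (obligationSet.map (fun obl => (pvULen graph obl : Int))) r.1.1 0 := by
    rw [hrb0, hsize0]
    have hr2l : r.2.length = pvULen graph (obligationSet[0]'hn) := by
      rw [hr2, PySem.List.pyGetD_eq_getElem obligationSet [] le_rfl (by exact_mod_cast hn)]
      rfl
    have : r.1.2.length = pvULen graph (obligationSet[0]'hn) := by omega
    exact_mod_cast congrArg (Nat.cast (R := Int)) this
  have hmain := mainFold graph obligationSet
    (PySem.List.pyRange 1 (obligationSet.length : Int))
    (fun x hx => by
      have := PySem.List.mem_pyRange_one.mp hx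
      exact ⟨by omega, by omega⟩)
    r.1.1 r.1.2 r.2 (by rw [hrb0]) (by rw [hrb0]; exact_mod_cast hn) hinv
  refine congrArg (fun idx => PySem.List.pyGetD obligationSet idx []) ?_
  rw [hrb0] at hmain
  have hre0 : r = ((0, r.1.2), r.2) := by conv_rhs => rw [← hrb0]
  rw [hre0]
  exact hmain

lemma sideB (graph : List (Int × List Int)) (o0 : List Int) (rest : List (List Int)) :
    moreConnectedObligation_alt graph (o0 :: rest)
      = PySem.List.pyGetD (o0 :: rest)
          ((PySem.List.pyRange 1 ((o0 :: rest).length : Int) 1).foldl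
            (fun best i =>
              if PySem.List.pyGetD ((o0 :: rest).map (fun obl => (pvULen graph obl : Int))) i 0 >
                 PySem.List.pyGetD ((o0 :: rest).map (fun obl => (pvULen graph obl : Int))) best 0
              then i else best) 0) [] := by
  have hBport : moreConnectedObligation_alt graph (o0 :: rest)
      = PySem.List.pyGetD (o0 :: rest)
          (((PySem.List.enumerate (o0 :: rest) 0).foldl
            (fun (st : Int × Int) p =>
              if pvSizeB graph p.2 > st.2 then (p.1, pvSizeB graph p.2) else st)
            ((0 : Int), (-1 : Int))).1) [] := rfl
  rw [hBport, PySem.List.enumerate_cons]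
  simp only [List.foldl_cons]
  set T := (o0 :: rest).map (fun obl => (pvULen graph obl : Int)) with hT
  have hlenT : T.length = rest.length + 1 := by simp [hT]
  have hT0 : PySem.List.pyGetD T 0 0 = (pvULen graph o0 : Int) := by
    rw [PySem.List.pyGetD_eq_getElem _ 0 le_rfl (by simp [hlenT])]
    simp [hT]
  have hpos : pvSizeB graph o0 > (-1 : Int) := by
    rw [sizeB_eq]
    have := Int.natCast_nonneg (pvULen graph o0)
    omega
  rw [if_pos hpos]
  have hmemB : ∀ p ∈ PySem.List.enumerate rest (0 + 1),
      pvSizeB graph p.2 = PySem.List.pyGetD T p.1 0 := by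
    intro p hp
    obtain ⟨k, hk, rfl⟩ := (PySem.List.mem_enumerate_iff ..).mp hp
    have hknat : ((0 : Int) + 1 + (k : Int)).toNat = k + 1 := by omega
    have hrange : (0 : Int) + 1 + (k : Int) < (T.length : Int) := by
      rw [hlenT]; push_cast; omega
    rw [PySem.List.pyGetD_eq_getElem _ 0 (by omega) hrange]
    simp only [hknat, hT, List.getElem_map, List.getElem_cons_succ]
    exact sizeB_eq graph rest[k]
  have hsb : pvSizeB graph o0 = PySem.List.pyGetD T 0 0 := by
    rw [hT0]; exact sizeB_eq graph o0
  rw [altFold graph T (PySem.List.enumerate rest (0 + 1)) hmemB 0 _ hsb]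
  refine congrArg (fun idx => PySem.List.pyGetD (o0 :: rest) idx []) ?_
  have hfm := List.foldl_map (f := fun (p : Int × List Int) => p.1)
    (g := fun (best i : Int) =>
      if PySem.List.pyGetD T i 0 > PySem.List.pyGetD T best 0 then i else best)
    (l := PySem.List.enumerate rest (0 + 1)) (init := (0 : Int))
  rw [← hfm]
  have hmf : (PySem.List.enumerate rest (0 + 1)).map (fun p => p.1)
      = PySem.List.pyRange 1 ((o0 :: rest).length : Int) 1 := by
    rw [PySem.List.map_fst_enumerate]
    congr 1
    simp
    omega
  rw [hmf]

-- ===== VERDICT (by name: the statement is the Claim_ definition above) =====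
theorem moreConnectedObligation_spec : Claim_equal_moreConnectedObligation := by
  intro graph obligationSet _ hPre
  obtain ⟨hne, -⟩ := hPre
  cases obligationSet with
  | nil => exact absurd rfl hne
  | cons o0 rest =>
    unfold Spec_moreConnectedObligation
    rw [sideA, sideB]
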